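-- pv_equiv track=rewrite | github.com/marcie-kang/codewars-solutions | python/[6kyu] Decipher this!.py | decipher_this
-- ===== SOURCE A (Python) =====
-- def decipher_this(s):
--     answer = []
--     words = s.split(" ")
--
--     for word in words:
--         decoded_word = ""
--         num = ""
--         num_idx = 0
--
--         for idx, text in enumerate(word):
--             if text.isnumeric() and idx == len(word) - 1:
--                 num += text
--                 decoded_word += chr(int(num))
--                 break
--             elif text.isnumeric():
--                 num += text
--                 num_idx = idx
--             else:
--                 if num_idx + 2 == len(word):
--                     decoded_word += chr(int(num)) + word[-1]
--                 else:
--                     decoded_word += chr(int(num)) + word[-1] + word[idx + 1:-1] + word[idx]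
--                 break
--
--         answer.append(decoded_word)
--
--     return " ".join(answer)
-- ===== SOURCE B (Python) =====
-- def _emit(num, letters):
--     if not num and not letters:
--         return ""
--     if len(letters) >= 2:
--         letters[0], letters[-1] = letters[-1], letters[0]
--     return chr(int("".join(num))) + "".join(letters)
--
--
-- def decipher_this(s):
--     pieces = []
--     num, letters = [], []
--     in_num = True
--     for ch in s:
--         if ch == " ":
--             pieces.append(_emit(num, letters))
--             num, letters, in_num = [], [], True
--         elif in_num and ch.isnumeric():
--             num.append(ch)
--         else:
--             letters.append(ch)
--             in_num = False
--     pieces.append(_emit(num, letters))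
--     return " ".join(pieces)
-- ===== Notes on version B (the rewrite author's own statement) =====
-- stated objective: alternative
-- what changed: B replaces A's split-into-words + per-word enumerate-with-break + global-index slicing by a single streaming pass over the characters: a 3-state machine accumulates the digit run and the letters per word, flushes on each space, and swaps the first and last letter by a tuple swap instead of slice concatenation.
import Mathlib
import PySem

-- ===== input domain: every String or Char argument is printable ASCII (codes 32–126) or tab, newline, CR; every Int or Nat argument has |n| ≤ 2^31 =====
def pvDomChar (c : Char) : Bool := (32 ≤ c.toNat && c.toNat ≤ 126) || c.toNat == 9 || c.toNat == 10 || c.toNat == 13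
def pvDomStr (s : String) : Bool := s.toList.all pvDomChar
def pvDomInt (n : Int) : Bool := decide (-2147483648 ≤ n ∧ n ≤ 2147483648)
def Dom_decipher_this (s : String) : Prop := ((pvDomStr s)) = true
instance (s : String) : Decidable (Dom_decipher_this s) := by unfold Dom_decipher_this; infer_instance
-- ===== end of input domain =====

-- B decodes in ONE streaming pass over the characters (a state machine: digit run / letters /
-- flush on space, swapping first and last letters by a tuple swap), instead of A's
-- split-into-words + enumerate-with-break + global-index slicing; objective: alternative.


-- ===== PORT A =====
-- chr(int(num)); int('') and chr of an out-of-range/surrogate code raise in Python and are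
-- excluded by Pre_, so the port's defaults here are unreachable inside Pre_.
def pvChr (num : List Char) : Char :=
  Char.ofNat ((PySem.Int.ofChars? num).getD 0).toNat

-- A's inner 'for idx, text in enumerate(word)' with its break; str.isnumeric agrees with
-- PySem.Chars.isdigit on the ASCII input domain.
def pvLoopA (word : List Char) : List Char → Nat → List Char → List Char → Nat → List Char
  | [], _, decoded, _, _ => decoded
  | text :: rem, idx, decoded, num, num_idx =>
    if PySem.Chars.isdigit text && (idx == word.length - 1) then
      decoded ++ [pvChr (num ++ [text])]
    else if PySem.Chars.isdigit text then
      pvLoopA word rem (idx + 1) decoded (num ++ [text]) idx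
    else
      if num_idx + 2 == word.length then
        decoded ++ [pvChr num] ++ (PySem.List.pyGet? word (-1)).toList
      else
        decoded ++ [pvChr num] ++ (PySem.List.pyGet? word (-1)).toList
          ++ PySem.List.slice word (some ((idx : Int) + 1)) (some (-1))
          ++ (PySem.List.pyGet? word ((idx : Nat) : Int)).toList

def decipher_this (s : String) : String :=
  String.ofList (PySem.Chars.join [' ']
    ((PySem.Chars.splitOn s.toList [' ']).foldl
      (fun acc word => acc ++ [pvLoopA word word 0 [] [] 0]) []))

-- ===== PORT B =====
-- Source B's _emit(num, letters): '' for an empty word, else swap first/last letter by the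
-- simultaneous assignment letters[0], letters[-1] = letters[-1], letters[0], then chr+join.
def pvEmitB (num letters : List Char) : List Char :=
  if num.isEmpty && letters.isEmpty then []
  else
    let ls := if 2 ≤ letters.length then
        (letters.set 0 ((PySem.List.pyGet? letters (-1)).getD default)).set
          (letters.length - 1) ((PySem.List.pyGet? letters 0).getD default)
      else letters
    pvChr num :: ls

-- one step of Source B's character loop; state = (pieces, num, letters, in_num)
def pvStepB (st : List (List Char) × List Char × List Char × Bool) (ch : Char) :
    List (List Char) × List Char × List Char × Bool :=
  if ch = ' ' then (st.1 ++ [pvEmitB st.2.1 st.2.2.1], [], [], true)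
  else if st.2.2.2 && PySem.Chars.isdigit ch then (st.1, st.2.1 ++ [ch], st.2.2.1, st.2.2.2)
  else (st.1, st.2.1, st.2.2.1 ++ [ch], false)

def decipher_this_alt (s : String) : String :=
  let st := s.toList.foldl pvStepB ([], [], [], true)
  String.ofList (PySem.Chars.join [' '] (st.1 ++ [pvEmitB st.2.1 st.2.2.1]))

-- ===== PRECONDITION & SPEC =====
-- Pre_ excludes the inputs where A raises (a nonempty word not starting with a digit →
-- ValueError from int(''); a leading digit run naming a code ≥ 0x110000 → ValueError from
-- chr) and the words whose leading digit run names a surrogate codepoint 0xD800–0xDFFF: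
-- there A (and B identically) return a lone-surrogate str, which is not a value of the
-- port's declared type — a Lean String cannot contain a surrogate — so the equivalence
-- cannot even be stated in Lean there (both Pythons still agree on those inputs).
def pvWordOK (w : List Char) : Bool :=
  w.isEmpty ||
    (PySem.Chars.isdigit w.headI &&
      (let n := (PySem.Int.ofChars? (w.takeWhile PySem.Chars.isdigit)).getD 0
       decide (n < 55296 ∨ (57344 ≤ n ∧ n < 1114112))))

def Pre_decipher_this (s : String) : Prop :=
  ∀ w ∈ PySem.Chars.splitOn s.toList [' '], pvWordOK w = true

instance (s : String) : Decidable (Pre_decipher_this s) := by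
  unfold Pre_decipher_this; infer_instance

def pvWitness_decipher_this : String := "72elo 87 119d!"

def Spec_decipher_this (s : String) (out : String) : Prop := out = decipher_this_alt s
instance (s : String) (out : String) : Decidable (Spec_decipher_this s out) := by
  unfold Spec_decipher_this; infer_instance

-- ===== CLAIM (what is proved, stated in full; the proofs are below) =====
def Claim_equal_decipher_this : Prop :=
  ∀ (s : String), Dom_decipher_this s → Pre_decipher_this s →
    Spec_decipher_this s (decipher_this s)

-- ===== LEMMAS AND PROOFS =====

-- The word-level state machine B runs between two spaces: (num, letters, in_num).
def pvWstep (st : List Char × List Char × Bool) (ch : Char) : List Char × List Char × Bool :=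
  if st.2.2 && PySem.Chars.isdigit ch then (st.1 ++ [ch], st.2.1, st.2.2)
  else (st.1, st.2.1 ++ [ch], false)

-- B's value for one word: run the word machine from fresh state, then emit.
def pvWordVal (w : List Char) : List Char :=
  let st := w.foldl pvWstep ([], [], true)
  pvEmitB st.1 st.2.1

-- clean single-char-separator splitter (= PySem.Chars.splitOn.go with enough fuel)
def pvGoS : List Char → List Char → List (List Char) → List (List Char)
  | [], cur, acc => (cur.reverse :: acc).reverse
  | c :: rest, cur, acc =>
    if c = ' ' then pvGoS rest [] (cur.reverse :: acc) else pvGoS rest (c :: cur) acc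

theorem pvGoS_eq_go (l : List Char) : ∀ (fuel : Nat) (cur : List Char)
    (acc : List (List Char)), l.length < fuel →
    PySem.Chars.splitOn.go [' '] fuel l cur acc = pvGoS l cur acc := by
  induction l with
  | nil =>
    intro fuel cur acc h
    cases fuel with
    | zero => omega
    | succ f => simp [PySem.Chars.splitOn.go, pvGoS]
  | cons c rest ih =>
    intro fuel cur acc h
    cases fuel with
    | zero => simp at h
    | succ f =>
      simp only [List.length_cons] at h
      by_cases hc : c = ' '
      · subst hc
        rw [show PySem.Chars.splitOn.go [' '] (f + 1) (' ' :: rest) cur acc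
            = PySem.Chars.splitOn.go [' '] f rest [] (cur.reverse :: acc) by
          simp [PySem.Chars.splitOn.go, List.isPrefixOf]]
        rw [ih f [] (cur.reverse :: acc) (by omega)]
        simp [pvGoS]
      · rw [show PySem.Chars.splitOn.go [' '] (f + 1) (c :: rest) cur acc
            = PySem.Chars.splitOn.go [' '] f rest (c :: cur) acc by
          simp [PySem.Chars.splitOn.go, List.isPrefixOf, Ne.symm hc]]
        rw [ih f (c :: cur) acc (by omega)]
        simp [pvGoS, hc]

theorem pvSplitOn_eq (l : List Char) :
    PySem.Chars.splitOn l [' '] = pvGoS l [] [] := by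
  simp only [PySem.Chars.splitOn]
  exact pvGoS_eq_go l (l.length + 1) [] [] (by omega)

theorem pvGoS_acc (l : List Char) : ∀ (cur : List Char) (acc : List (List Char)),
    pvGoS l cur acc = acc.reverse ++ pvGoS l cur [] := by
  induction l with
  | nil => intro cur acc; simp [pvGoS]
  | cons c rest ih =>
    intro cur acc
    by_cases hc : c = ' '
    · subst hc
      simp only [pvGoS]
      rw [ih [] (cur.reverse :: acc), ih [] [cur.reverse]]
      simp
    · simp only [pvGoS, if_neg hc]
      exact ih (c :: cur) acc

-- a non-space character only advances the word machine
theorem pvStepB_nonspace (ps : List (List Char)) (wst : List Char × List Char × Bool)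
    (c : Char) (hc : c ≠ ' ') :
    pvStepB (ps, wst) c = (ps, pvWstep wst c) := by
  simp only [pvStepB, pvWstep, if_neg hc]
  split_ifs <;> rfl

-- the streaming loop = one emitted piece per pvGoS word
theorem pvStream (l : List Char) : ∀ (cur : List Char) (ps : List (List Char)),
    (let st := List.foldl pvStepB (ps, (cur.reverse).foldl pvWstep ([], [], true)) l
     st.1 ++ [pvEmitB st.2.1 st.2.2.1])
      = ps ++ (pvGoS l cur []).map pvWordVal := by
  induction l with
  | nil =>
    intro cur ps
    simp [pvGoS, pvWordVal]
  | cons c rest ih =>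
    intro cur ps
    by_cases hc : c = ' '
    · subst hc
      simp only [List.foldl_cons]
      rw [show pvStepB (ps, (cur.reverse).foldl pvWstep ([], [], true)) ' '
          = (ps ++ [pvWordVal cur.reverse], (([] : List Char).reverse).foldl pvWstep ([], [], true)) by
        simp [pvStepB, pvWordVal]]
      rw [ih [] (ps ++ [pvWordVal cur.reverse])]
      simp only [pvGoS]
      rw [pvGoS_acc rest [] [cur.reverse]]
      simp
    · simp only [List.foldl_cons]
      rw [pvStepB_nonspace _ _ _ hc,
        show pvWstep ((cur.reverse).foldl pvWstep ([], [], true)) c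
            = ((c :: cur).reverse).foldl pvWstep ([], [], true) by
          simp [List.foldl_append]]
      rw [ih (c :: cur) ps]
      simp [pvGoS, hc]

-- B = join of the per-word values over Python's split
theorem pvAlt_eq (s : String) :
    decipher_this_alt s
      = String.ofList (PySem.Chars.join [' ']
          ((PySem.Chars.splitOn s.toList [' ']).map pvWordVal)) := by
  unfold decipher_this_alt
  rw [pvSplitOn_eq]
  have h := pvStream s.toList [] []
  simp only [List.reverse_nil, List.foldl_nil, List.nil_append] at h
  simp only [h]

-- ===== A-side word analysis (as in the per-word decomposition w = digits ++ rest) =====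

-- xs[a:-1] for a natural a is drop-then-dropLast
theorem pvSliceNegOne {α : Type} (xs : List α) (a : Nat) :
    PySem.List.slice xs (some (a : Int)) (some (-1)) = (xs.drop a).dropLast := by
  simp only [PySem.List.slice, PySem.List.clampIdx, List.dropLast_eq_take, List.length_drop]
  rw [if_neg (show ¬((a : Int) < 0) by omega), if_pos (show (-1 : Int) < 0 by norm_num)]
  by_cases hxs : xs = []
  · subst hxs; simp
  · have hl : 1 ≤ xs.length := by
      rcases xs with _ | _
      · exact absurd rfl hxs
      · simp
    rw [if_neg (show ¬((xs.length : Int) + -1 < 0) by omega)]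
    simp only [Int.toNat_natCast]
    by_cases ha : a ≤ xs.length
    · rw [min_eq_left ha]; congr 1; omega
    · rw [min_eq_right (by omega), List.drop_length, List.drop_eq_nil_of_le (by omega)]
      simp

theorem pvSliceNegOne' {α : Type} (xs : List α) (a : Int) (ha : 0 ≤ a) :
    PySem.List.slice xs (some a) (some (-1)) = (xs.drop a.toNat).dropLast := by
  obtain ⟨n, rfl⟩ : ∃ n : Nat, a = (n : Int) := ⟨a.toNat, by omega⟩
  rw [pvSliceNegOne]
  simp

-- A's loop consumes a nonempty all-digit block d in one stretch.
theorem pvLoopA_digits (d : List Char) (hd : ∀ c ∈ d, PySem.Chars.isdigit c = true)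
    (hne : d ≠ []) :
    ∀ (word r : List Char) (idx : Nat) (decoded num : List Char) (num_idx : Nat),
      word.length = idx + d.length + r.length →
      pvLoopA word (d ++ r) idx decoded num num_idx =
        if r.isEmpty then decoded ++ [pvChr (num ++ d)]
        else pvLoopA word r (idx + d.length) decoded (num ++ d) (idx + d.length - 1) := by
  induction d with
  | nil => exact absurd rfl hne
  | cons c d' ih =>
    intro word r idx decoded num num_idx hlen
    have hc : PySem.Chars.isdigit c = true := hd c (by simp)
    by_cases hd' : d' = []
    · subst hd'
      cases r with
      | nil =>
        simp only [List.append_nil, List.isEmpty_nil, if_true]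
        simp only [List.length_cons, List.length_nil] at hlen
        simp [pvLoopA, hc, show idx = word.length - 1 by omega]
      | cons r0 rs =>
        have hidx : ¬ (idx = word.length - 1) := by
          simp only [List.length_cons, List.length_nil] at hlen; omega
        simp [pvLoopA, hc, hidx]
    · have hstep : ¬ (idx = word.length - 1) := by
        have : d'.length ≠ 0 := by simpa using (List.length_eq_zero_iff.not.mpr hd')
        simp only [List.length_cons] at hlen; omega
      have hrec := ih (fun x hx => hd x (by simp [hx])) hd' word r (idx + 1) decoded
        (num ++ [c]) idx (by simp only [List.length_cons] at hlen ⊢; omega)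
      simp only [List.cons_append, pvLoopA, hc, Bool.true_and, beq_iff_eq, hstep,
        if_false, if_true] at *
      rw [hrec]
      have harith : idx + 1 + d'.length = idx + (d'.length + 1) := by omega
      simp only [List.append_assoc, List.singleton_append, List.length_cons, harith]

-- ===== B-side word analysis =====

theorem pvWfold_digits (d : List Char) (hd : ∀ c ∈ d, PySem.Chars.isdigit c = true) :
    ∀ (n : List Char), d.foldl pvWstep (n, [], true) = (n ++ d, [], true) := by
  induction d with
  | nil => intro n; simp
  | cons c d' ih =>
    intro n
    have hc : PySem.Chars.isdigit c = true := hd c (by simp)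
    rw [List.foldl_cons,
      show pvWstep (n, [], true) c = (n ++ [c], [], true) by simp [pvWstep, hc],
      ih (fun x hx => hd x (by simp [hx])) (n ++ [c])]
    simp

theorem pvWfold_letters (r : List Char) :
    ∀ (n l : List Char), r.foldl pvWstep (n, l, false) = (n, l ++ r, false) := by
  induction r with
  | nil => intro n l; simp
  | cons c r' ih =>
    intro n l
    simp only [List.foldl_cons, pvWstep, Bool.false_and, if_neg (by simp : ¬(false = true))]
    rw [ih n (l ++ [c])]
    simp

-- last-position set is dropLast ++ [x]
theorem pvSet_last (x : Char) (l : List Char) (hl : l ≠ []) :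
    l.set (l.length - 1) x = l.dropLast ++ [x] := by
  induction l with
  | nil => exact absurd rfl hl
  | cons a l' ih =>
    cases l' with
    | nil => rfl
    | cons b l'' =>
      have h2 := ih (by simp)
      simp only [List.length_cons, Nat.add_sub_cancel] at h2 ⊢
      rw [List.set_cons_succ, h2]
      simp

-- the per-word equivalence on the decomposition word = d ++ r
theorem pvWordDR (d r : List Char) (hdall : ∀ c ∈ d, PySem.Chars.isdigit c = true)
    (hdne : d ≠ []) (hr0 : ∀ c ∈ r.head?, PySem.Chars.isdigit c = false) :
    pvLoopA (d ++ r) (d ++ r) 0 [] [] 0 = pvWordVal (d ++ r) := by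
  have hd1 : 0 < d.length := List.length_pos_of_ne_nil hdne
  have hA := pvLoopA_digits d hdall hdne (d ++ r) r 0 [] [] 0 (by simp)
  have hdE : d.isEmpty = false := by
    rcases d with _ | _
    · exact absurd rfl hdne
    · simp
  rw [hA]
  cases r with
  | nil =>
    simp only [List.isEmpty_nil, if_true, List.nil_append, List.append_nil]
    unfold pvWordVal
    rw [pvWfold_digits d hdall []]
    simp [pvEmitB, hdE]
  | cons r0 rs =>
    have hr0' : PySem.Chars.isdigit r0 = false := hr0 r0 (by simp)
    have hB : pvWordVal (d ++ r0 :: rs) = pvEmitB d (r0 :: rs) := by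
      unfold pvWordVal
      rw [show d ++ r0 :: rs = (d ++ [r0]) ++ rs by simp, List.foldl_append,
        List.foldl_append, pvWfold_digits d hdall []]
      simp only [List.nil_append, List.foldl_cons, List.foldl_nil, pvWstep, hr0',
        Bool.and_false, if_neg (by simp : ¬(false = true))]
      rw [pvWfold_letters rs d [r0]]
      rfl
    rw [hB]
    simp only [List.isEmpty_cons, Bool.false_eq_true, if_false, pvLoopA, hr0',
      Bool.false_and, List.nil_append]
    cases rs with
    | nil =>
      rw [if_pos (by simp only [beq_iff_eq, List.length_append, List.length_cons,
            List.length_nil]; omega)]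
      rw [PySem.List.pyGet?_neg_one_append_singleton]
      simp [pvEmitB, hdE]
    | cons r1 rs' =>
      rw [if_neg (by simp only [beq_iff_eq, List.length_append, List.length_cons]; omega)]
      obtain ⟨x, hx⟩ : ∃ x, (r0 :: r1 :: rs').getLast? = some x := by
        cases h : (r0 :: r1 :: rs').getLast?
        · exact absurd h (by simp)
        · exact ⟨_, rfl⟩
      have hlastW : PySem.List.pyGet? (d ++ r0 :: r1 :: rs') (-1) = some x := by
        rw [PySem.List.pyGet?_neg_one,
          List.getLast?_append_of_ne_nil d (List.cons_ne_nil r0 (r1 :: rs')), hx]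
      have hidxW : PySem.List.pyGet? (d ++ r0 :: r1 :: rs') ((d.length : Nat) : Int)
          = some r0 := PySem.List.pyGet?_append_length d (r1 :: rs') r0
      have hsliceW : PySem.List.slice (d ++ r0 :: r1 :: rs')
            (some ((d.length : Int) + 1)) (some (-1))
          = (r1 :: rs').dropLast := by
        rw [pvSliceNegOne' _ _ (by omega),
          show ((d.length : Int) + 1).toNat = d.length + 1 by omega,
          show (d ++ r0 :: r1 :: rs').drop (d.length + 1)
              = ((d ++ r0 :: r1 :: rs').drop d.length).drop 1 by rw [List.drop_drop],
          List.drop_left]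
        rfl
      simp only [Nat.zero_add]
      rw [hlastW, hidxW, hsliceW]
      -- B's emit with the swap
      have hlen2 : 2 ≤ (r0 :: r1 :: rs').length := by simp
      simp only [pvEmitB, hdE, List.isEmpty_cons, Bool.false_and, Bool.false_eq_true,
        if_false, if_pos hlen2, PySem.List.pyGet?_neg_one, hx,
        PySem.List.pyGet?_zero_cons, Option.getD_some]
      rw [show (r0 :: r1 :: rs').set 0 x = x :: r1 :: rs' from rfl]
      rw [show (r0 :: r1 :: rs').length - 1 = ((r1 :: rs').length - 1) + 1 by simp]
      rw [List.set_cons_succ, pvSet_last r0 (r1 :: rs') (by simp)]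
      simp

-- the per-word equivalence, under the per-word precondition
theorem pvWord_eq (w : List Char) (h : pvWordOK w = true) :
    pvLoopA w w 0 [] [] 0 = pvWordVal w := by
  by_cases hw : w = []
  · subst hw; rfl
  · have hdig : PySem.Chars.isdigit w.headI = true := by
      rcases w with _ | ⟨c, _⟩
      · exact absurd rfl hw
      · simp only [pvWordOK, List.isEmpty_cons, Bool.false_or, Bool.and_eq_true] at h
        exact h.1
    have hsplit : w.takeWhile PySem.Chars.isdigit ++ w.dropWhile PySem.Chars.isdigit = w :=
      List.takeWhile_append_dropWhile
    have hdall : ∀ c ∈ w.takeWhile PySem.Chars.isdigit, PySem.Chars.isdigit c = true :=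
      fun c hc => List.mem_takeWhile_imp hc
    have hdne : w.takeWhile PySem.Chars.isdigit ≠ [] := by
      rcases w with _ | ⟨c, cs⟩
      · exact absurd rfl hw
      · have hc : PySem.Chars.isdigit c = true := by simpa using hdig
        simp [List.takeWhile, hc]
    have hr0 : ∀ c ∈ (w.dropWhile PySem.Chars.isdigit).head?,
        PySem.Chars.isdigit c = false := by
      intro c hc
      have hhd := List.head?_dropWhile_not PySem.Chars.isdigit w
      rcases hrr : w.dropWhile PySem.Chars.isdigit with _ | ⟨r0, rs⟩
      · rw [hrr] at hc; simp at hc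
      · rw [hrr] at hc hhd
        simp only [List.head?_cons, Option.mem_def, Option.some.injEq] at hc
        subst hc
        simpa using hhd
    rw [← hsplit]
    exact pvWordDR _ _ hdall hdne hr0

-- ===== VERDICT (by name: the statement is the Claim_ definition above) =====
theorem decipher_this_spec : Claim_equal_decipher_this := by
  intro s _ hpre
  unfold Spec_decipher_this decipher_this
  rw [pvAlt_eq, PySem.List.foldl_append_singleton_eq_map]
  congr 2
  exact List.map_congr_left (fun w hw => pvWord_eq w (hpre w hw))
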